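-- pv_equiv track=rewrite | github.com/elija-feigl/dnaFit | pdbCorrection.py | reshuffle_pdb
-- ===== SOURCE A (Python) =====
-- from typing import List, Set, Dict, Tuple, Optional, Any, TextIO
--
-- def reshuffle_pdb(pdb_file: List[str]) -> List[str]:
--     unshuff_file = []
--     rem = []
--     for line in pdb_file:
--         lineType = line[0:6]
--         if lineType == "ATOM  ":
--             unshuff_file.append(line)
--         else:
--             rem.append(line)
--     unshuff_file.sort(key=lambda x: (x[72:76], int(x[22:27].strip())))
--     newFile_list = (rem + unshuff_file)
--     return newFile_list
-- ===== SOURCE B (Python) =====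
-- def reshuffle_pdb(pdb_file):
--     rem = []
--     groups = {}
--     for line in pdb_file:
--         if line[0:6] == "ATOM  ":
--             key = (line[72:76], int(line[22:27].strip()))
--             groups.setdefault(key, []).append(line)
--         else:
--             rem.append(line)
--     for key in sorted(groups):
--         rem.extend(groups[key])
--     return rem
-- ===== Notes on version B (the rewrite author's own statement) =====
-- stated objective: alternative
-- what changed: Replaces the comparison sort over all ATOM lines with a key-indexed grouping dict built in the partition pass, then concatenates the groups in sorted-unique-key order (stability comes from list appends instead of Timsort).
import Mathlib
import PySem

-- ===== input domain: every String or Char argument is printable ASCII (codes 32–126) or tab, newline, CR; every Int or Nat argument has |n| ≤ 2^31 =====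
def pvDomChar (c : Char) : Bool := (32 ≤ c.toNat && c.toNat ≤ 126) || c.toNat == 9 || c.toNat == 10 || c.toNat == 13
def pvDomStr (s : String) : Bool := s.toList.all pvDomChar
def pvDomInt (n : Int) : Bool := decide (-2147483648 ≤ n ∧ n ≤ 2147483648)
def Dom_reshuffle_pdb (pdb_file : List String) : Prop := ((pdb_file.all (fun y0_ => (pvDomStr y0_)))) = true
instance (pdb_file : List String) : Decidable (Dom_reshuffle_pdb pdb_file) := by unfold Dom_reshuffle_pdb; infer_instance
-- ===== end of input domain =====

-- B replaces the comparison sort over all ATOM lines by a grouping dict keyed by (chain, resid),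
-- concatenated in sorted-unique-key order (objective: alternative decomposition, same results).

-- line[0:6] == "ATOM  "
def pvLineIsAtom (s : String) : Bool := PySem.Str.slice s (some 0) (some 6) == "ATOM  "
-- x[72:76]
def pvKey1 (s : String) : String := PySem.Str.slice s (some 72) (some 76)
-- int(x[22:27].strip()); the .getD 0 is never taken under Pre_ (the parse succeeds there)
def pvKey2 (s : String) : Int := (PySem.Int.ofStr? (PySem.Str.strip (PySem.Str.slice s (some 22) (some 27)))).getD 0
def pvKey (s : String) : String × Int := (pvKey1 s, pvKey2 s)

-- ===== PORT A =====
def reshuffle_pdb (pdb_file : List String) : List String :=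
  let st := pdb_file.foldl
    (fun (st : List String × List String) line =>
      if pvLineIsAtom line then (st.1 ++ [line], st.2) else (st.1, st.2 ++ [line]))
    ([], [])
  st.2 ++ PySem.List.sorted2 st.1 pvKey1 pvKey2 false

-- ===== PORT B =====
def reshuffle_pdb_alt (pdb_file : List String) : List String :=
  let st := pdb_file.foldl
    (fun (st : List String × PySem.Dict (String × Int) (List String)) line =>
      if pvLineIsAtom line then (st.1, st.2.modify (pvKey line) [] (· ++ [line]))
      else (st.1 ++ [line], st.2))
    ([], PySem.Dict.empty)
  (PySem.List.sorted2 st.2.keys Prod.fst Prod.snd false).foldl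
    (fun acc c => acc ++ st.2.getD c []) st.1

-- ===== PRECONDITION & SPEC =====
-- Pre_ excludes exactly the inputs where Python raises ValueError: an "ATOM  " line whose
-- columns 22:27 do not strip to a valid int literal (both A and B parse it and raise there).
def Pre_reshuffle_pdb (pdb_file : List String) : Prop :=
  pdb_file.all (fun s => !(pvLineIsAtom s)
    || (PySem.Int.ofStr? (PySem.Str.strip (PySem.Str.slice s (some 22) (some 27)))).isSome) = true
instance (pdb_file : List String) : Decidable (Pre_reshuffle_pdb pdb_file) := by
  unfold Pre_reshuffle_pdb; infer_instance

def pvWitness_reshuffle_pdb : List String :=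
  ["REMARK", "ATOM  AAAAAAAAAAAAAAAA    7", "ATOM  AAAAAAAAAAAAAAAA    2"]

def Spec_reshuffle_pdb (pdb_file : List String) (out : List String) : Prop := out = reshuffle_pdb_alt pdb_file
instance (pdb_file : List String) (out : List String) : Decidable (Spec_reshuffle_pdb pdb_file out) := by unfold Spec_reshuffle_pdb; infer_instance

-- ===== CLAIM (what is proved, stated in full; the proofs are below) =====
def Claim_equal_reshuffle_pdb : Prop := ∀ (pdb_file : List String), Dom_reshuffle_pdb pdb_file → Pre_reshuffle_pdb pdb_file → Spec_reshuffle_pdb pdb_file (reshuffle_pdb pdb_file)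

-- ===== LEMMAS AND PROOFS =====

-- Python's strict '<' on the (chain, resid) tuples
def pvKLt (c d : String × Int) : Bool :=
  decide (c.1 < d.1) || (!decide (d.1 < c.1) && decide (c.2 < d.2))

theorem pvKLt_irrefl (c : String × Int) : pvKLt c c = false := by
  simp [pvKLt]

theorem pvKLt_asymm {c d : String × Int} (h : pvKLt c d = true) : pvKLt d c = false := by
  rcases c with ⟨c1, c2⟩; rcases d with ⟨d1, d2⟩
  simp only [pvKLt, Bool.or_eq_true, Bool.and_eq_true, Bool.not_eq_true',
    decide_eq_true_iff, decide_eq_false_iff_not, Bool.or_eq_false_iff,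
    Bool.and_eq_false_iff, Bool.not_eq_false'] at h ⊢
  rcases h with h | ⟨h, h2⟩
  · exact ⟨lt_asymm h, Or.inl (by simpa using h)⟩
  · exact ⟨h, Or.inr (by omega)⟩

theorem pvKLt_conn {c d : String × Int} (h1 : pvKLt c d = false) (h2 : pvKLt d c = false) :
    c = d := by
  rcases c with ⟨c1, c2⟩; rcases d with ⟨d1, d2⟩
  simp only [pvKLt, Bool.or_eq_false_iff, Bool.and_eq_false_iff, Bool.not_eq_false',
    decide_eq_false_iff_not, decide_eq_true_iff] at h1 h2
  obtain ⟨h1a, h1b⟩ := h1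
  obtain ⟨h2a, h2b⟩ := h2
  have he : c1 = d1 := le_antisymm (not_lt.mp h2a) (not_lt.mp h1a)
  rcases h1b with h | h
  · exact absurd h2a (by simp [h])
  · rcases h2b with h' | h'
    · exact absurd h1a (by simp [h'])
    · exact Prod.ext he (by omega)

theorem pvKLt_trans {a b c : String × Int} (h1 : pvKLt a b = true) (h2 : pvKLt b c = true) :
    pvKLt a c = true := by
  rcases a with ⟨a1, a2⟩; rcases b with ⟨b1, b2⟩; rcases c with ⟨c1, c2⟩
  simp only [pvKLt, Bool.or_eq_true, Bool.and_eq_true, Bool.not_eq_true',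
    decide_eq_true_iff, decide_eq_false_iff_not] at h1 h2 ⊢
  rcases h1 with h1 | ⟨h1a, h1b⟩
  · rcases h2 with h2 | ⟨h2a, h2b⟩
    · exact Or.inl (lt_trans h1 h2)
    · exact Or.inl (lt_of_lt_of_le h1 (not_lt.mp h2a))
  · rcases h2 with h2 | ⟨h2a, h2b⟩
    · exact Or.inl (lt_of_le_of_lt (not_lt.mp h1a) h2)
    · exact Or.inr ⟨not_lt.mpr (le_trans (not_lt.mp h1a) (not_lt.mp h2a)), by omega⟩

-- insertBy walks past a prefix none of whose elements come after x
theorem insertBy_append_passed {α : Type} (bef : α → α → Bool) (x : α) (u v : List α)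
    (hu : ∀ y ∈ u, bef x y = false) :
    PySem.List.insertBy bef x (u ++ v) = u ++ PySem.List.insertBy bef x v := by
  induction u with
  | nil => rfl
  | cons a u ih =>
    have ha := hu a (by simp)
    simp [PySem.List.insertBy, ha, ih (fun y hy => hu y (by simp [hy]))]

theorem insertBy_all_before {α : Type} (bef : α → α → Bool) (x : α) (L : List α)
    (hL : ∀ y ∈ L, bef x y = true) :
    PySem.List.insertBy bef x L = x :: L := by
  cases L with
  | nil => rfl
  | cons a L => simp [PySem.List.insertBy, hL a (by simp)]

theorem pairwise_insertBy {L : List (String × Int)} {x : String × Int}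
    (hL : L.Pairwise (fun a b => pvKLt a b = true)) (hx : x ∉ L) :
    (PySem.List.insertBy pvKLt x L).Pairwise (fun a b => pvKLt a b = true) := by
  induction L with
  | nil => simp [PySem.List.insertBy]
  | cons c L ih =>
    rcases List.pairwise_cons.mp hL with ⟨hc, hL'⟩
    by_cases h : pvKLt x c = true
    · rw [show PySem.List.insertBy pvKLt x (c :: L) = x :: c :: L by
        simp [PySem.List.insertBy, h]]
      exact List.pairwise_cons.mpr ⟨by
        intro d hd
        rcases List.mem_cons.mp hd with rfl | hd
        · exact h
        · exact pvKLt_trans h (hc d hd), hL⟩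
    · rw [show PySem.List.insertBy pvKLt x (c :: L) = c :: PySem.List.insertBy pvKLt x L by
        simp [PySem.List.insertBy, h]]
      refine List.pairwise_cons.mpr ⟨?_, ih hL' (fun hm => hx (by simp [hm]))⟩
      intro d hd
      rcases (PySem.List.mem_insertBy pvKLt x d L).mp hd with he | hd'
      · subst he
        cases ht : pvKLt c d with
        | true => rfl
        | false =>
          exact absurd (pvKLt_conn ht (Bool.eq_false_iff.mpr h))
            (fun heq => hx (by rw [← heq]; simp))
      · exact hc d hd'

-- the sorted-keys fold: pairwise strictly increasing, same members
theorem sortedKeys_props (ks : List (String × Int)) (hnd : ks.Nodup) :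
    (ks.foldl (fun acc c => PySem.List.insertBy pvKLt c acc) []).Pairwise
        (fun a b => pvKLt a b = true)
    ∧ ∀ c, c ∈ ks.foldl (fun acc c => PySem.List.insertBy pvKLt c acc) [] ↔ c ∈ ks := by
  induction ks using List.reverseRecOn with
  | nil => simp
  | append_singleton ks c ih =>
    have hnd' : ks.Nodup := hnd.sublist (by simp)
    have hcks : c ∉ ks := by
      have := List.nodup_middle.mp (by simpa using hnd)
      simpa using (List.nodup_cons.mp this).1
    rcases ih hnd' with ⟨hp, hm⟩
    rw [List.foldl_append]
    constructor
    · exact pairwise_insertBy hp (fun h => hcks ((hm c).mp h))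
    · intro d
      rw [List.foldl_cons, List.foldl_nil, PySem.List.mem_insertBy]
      simp [hm d, or_comm]

theorem flatMap_congr_mem {α β : Type} {B : List α} {f g : α → List β}
    (h : ∀ c ∈ B, f c = g c) : B.flatMap f = B.flatMap g := by
  induction B with
  | nil => rfl
  | cons c B ih =>
    simp only [List.flatMap_cons, h c (by simp), ih (fun d hd => h d (by simp [hd]))]

-- inserting x whose key is already a bucket key appends x to its bucket
theorem insertBy_flatMap_mem {α : Type} (k : α → String × Int) (x : α)
    (B : List (String × Int)) (g : (String × Int) → List α)
    (hB : B.Pairwise (fun a b => pvKLt a b = true))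
    (hkey : ∀ c ∈ B, ∀ y ∈ g c, k y = c)
    (hx : k x ∈ B) :
    PySem.List.insertBy (fun a b => pvKLt (k a) (k b)) x (B.flatMap g)
      = B.flatMap (fun c => if c = k x then g c ++ [x] else g c) := by
  induction B with
  | nil => simp at hx
  | cons c B ih =>
    rcases List.pairwise_cons.mp hB with ⟨hc, hB'⟩
    by_cases hcx : c = k x
    · have hnB : ∀ d ∈ B, d ≠ k x := by
        intro d hd he
        have := hc d hd
        rw [he, ← hcx] at this
        exact absurd (pvKLt_irrefl c) (by simp [this])
      rw [List.flatMap_cons,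
        insertBy_append_passed _ x (g c) (B.flatMap g)
          (fun y hy => by rw [hkey c (by simp) y hy, ← hcx]; exact pvKLt_irrefl c),
        insertBy_all_before _ x (B.flatMap g)
          (fun y hy => by
            rcases List.mem_flatMap.mp hy with ⟨d, hd, hyd⟩
            rw [hkey d (by simp [hd]) y hyd, ← hcx]
            exact hc d hd)]
      simp only [List.flatMap_cons, if_pos hcx]
      rw [flatMap_congr_mem (f := fun d => if d = k x then g d ++ [x] else g d)
        (g := g) (fun d hd => by
          show (if d = k x then g d ++ [x] else g d) = g d
          rw [if_neg (hnB d hd)])]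
      simp
    · have hx' : k x ∈ B := by
        cases List.mem_cons.mp hx with
        | inl he => exact absurd he.symm hcx
        | inr hm => exact hm
      have hlt : pvKLt c (k x) = true := hc (k x) hx'
      rw [List.flatMap_cons,
        insertBy_append_passed _ x (g c) (B.flatMap g)
          (fun y hy => by rw [hkey c (by simp) y hy]; exact pvKLt_asymm hlt),
        ih hB' (fun d hd => hkey d (by simp [hd])) hx']
      simp only [List.flatMap_cons, if_neg (fun h : c = k x => hcx h)]

-- inserting x with a fresh key inserts a fresh singleton bucket at its sorted place
theorem insertBy_flatMap_not_mem {α : Type} (k : α → String × Int) (x : α)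
    (B : List (String × Int)) (g : (String × Int) → List α)
    (hB : B.Pairwise (fun a b => pvKLt a b = true))
    (hkey : ∀ c ∈ B, ∀ y ∈ g c, k y = c)
    (hx : k x ∉ B) :
    PySem.List.insertBy (fun a b => pvKLt (k a) (k b)) x (B.flatMap g)
      = (PySem.List.insertBy pvKLt (k x) B).flatMap
          (fun c => if c = k x then [x] else g c) := by
  induction B with
  | nil => simp [PySem.List.insertBy]
  | cons c B ih =>
    rcases List.pairwise_cons.mp hB with ⟨hc, hB'⟩
    have hcx : c ≠ k x := fun h => hx (by simp [h])
    by_cases h : pvKLt (k x) c = true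
    · have hall : ∀ y ∈ (c :: B).flatMap g, pvKLt (k x) (k y) = true := by
        intro y hy
        rcases List.mem_flatMap.mp hy with ⟨d, hd, hyd⟩
        rw [hkey d hd y hyd]
        rcases List.mem_cons.mp hd with rfl | hd'
        · exact h
        · exact pvKLt_trans h (hc d hd')
      rw [insertBy_all_before _ x _ hall,
        show PySem.List.insertBy pvKLt (k x) (c :: B) = k x :: c :: B by
          simp [PySem.List.insertBy, h]]
      simp only [List.flatMap_cons, if_neg hcx]
      rw [flatMap_congr_mem (f := fun d => if d = k x then [x] else g d) (g := g)
        (fun d hd => by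
          show (if d = k x then [x] else g d) = g d
          rw [if_neg (fun he => hx (by simp [he ▸ hd]))])]
      simp
    · have hlt : pvKLt c (k x) = true := by
        cases ht : pvKLt c (k x) with
        | true => rfl
        | false => exact absurd (pvKLt_conn ht (Bool.eq_false_iff.mpr h)) hcx
      rw [List.flatMap_cons,
        insertBy_append_passed _ x (g c) (B.flatMap g)
          (fun y hy => by rw [hkey c (by simp) y hy]; exact pvKLt_asymm hlt),
        ih hB' (fun d hd => hkey d (by simp [hd])) (fun hm => hx (by simp [hm])),
        show PySem.List.insertBy pvKLt (k x) (c :: B) = c :: PySem.List.insertBy pvKLt (k x) B by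
          simp [PySem.List.insertBy, h]]
      simp only [List.flatMap_cons, if_neg hcx]

-- MAIN: a stable insertion sort by key equals bucket concatenation in sorted-unique-key order
theorem stable_sort_eq_buckets {α : Type} (k : α → String × Int) (xs : List α) :
    xs.foldl (fun acc x => PySem.List.insertBy (fun a b => pvKLt (k a) (k b)) x acc) []
      = ((PySem.Set.ofList (xs.map k)).foldl
            (fun acc c => PySem.List.insertBy pvKLt c acc) []).flatMap
          (fun c => xs.filter (fun x => k x == c)) := by
  induction xs using List.reverseRecOn with
  | nil => simp
  | append_singleton xs x ih =>
    rcases sortedKeys_props (PySem.Set.ofList (xs.map k)) (PySem.Set.nodup_ofList _)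
      with ⟨hp, hm⟩
    have hkey : ∀ c ∈ (PySem.Set.ofList (xs.map k)).foldl
        (fun acc c => PySem.List.insertBy pvKLt c acc) [],
        ∀ y ∈ xs.filter (fun x => k x == c), k y = c := by
      intro c _ y hy
      exact eq_of_beq (List.mem_filter.mp hy).2
    have hfilter : ∀ c, (xs ++ [x]).filter (fun z => k z == c)
        = xs.filter (fun z => k z == c) ++ if k x == c then [x] else [] := by
      intro c; rw [List.filter_append]; cases h : k x == c <;> simp [List.filter, h, eq_of_beq]
    rw [List.foldl_append, List.foldl_cons, List.foldl_nil, ih]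
    simp only [List.map_append, List.map_cons, List.map_nil]
    rw [PySem.Set.ofList_append_singleton]
    by_cases hmem : k x ∈ PySem.Set.ofList (xs.map k)
    · rw [PySem.Set.add_of_mem hmem,
        insertBy_flatMap_mem k x _ _ hp hkey ((hm (k x)).mpr hmem)]
      apply flatMap_congr_mem
      intro c _
      rw [hfilter c]
      by_cases hc : c = k x
      · rw [if_pos hc, if_pos (beq_iff_eq.mpr hc.symm)]
      · rw [if_neg hc, if_neg (by
          show ¬ (k x == c) = true
          simp only [beq_iff_eq]
          exact fun he => hc he.symm), List.append_nil]
    · rw [PySem.Set.add_of_not_mem hmem, List.foldl_append, List.foldl_cons, List.foldl_nil,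
        insertBy_flatMap_not_mem k x _ _ hp hkey (fun h => hmem ((hm (k x)).mp h))]
      apply flatMap_congr_mem
      intro c hc
      rw [hfilter c]
      by_cases hceq : c = k x
      · rw [if_pos hceq, if_pos (beq_iff_eq.mpr hceq.symm),
          List.filter_eq_nil_iff.mpr, List.nil_append]
        intro z hz hbeq
        refine hmem ?_
        rw [PySem.Set.mem_ofList]
        rw [hceq] at hbeq
        exact (eq_of_beq hbeq) ▸ List.mem_map_of_mem hz
      · rw [if_neg hceq, if_neg (by
          show ¬ (k x == c) = true
          simp only [beq_iff_eq]
          exact fun he => hceq he.symm), List.append_nil]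

-- both sorted2's are insertBy folds with pvKLt
theorem pvKey_fst (s : String) : (pvKey s).1 = pvKey1 s := by simp [pvKey]

theorem pvKey_snd (s : String) : (pvKey s).2 = pvKey2 s := by simp [pvKey]

theorem sorted2_lines_eq (xs : List String) :
    PySem.List.sorted2 xs pvKey1 pvKey2 false
      = xs.foldl (fun acc x => PySem.List.insertBy
          (fun a b => pvKLt (pvKey a) (pvKey b)) x acc) [] := by
  have hbef : (fun (a b : String) => decide (pvKey1 a < pvKey1 b)
        || (!decide (pvKey1 b < pvKey1 a) && decide (pvKey2 a < pvKey2 b)))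
      = fun a b => pvKLt (pvKey a) (pvKey b) := by
    funext a b
    unfold pvKLt
    rw [pvKey_fst, pvKey_fst, pvKey_snd, pvKey_snd]
  show xs.foldl (fun acc x => PySem.List.insertBy
      (fun a b => decide (pvKey1 a < pvKey1 b)
        || (!decide (pvKey1 b < pvKey1 a) && decide (pvKey2 a < pvKey2 b))) x acc) [] = _
  rw [hbef]

theorem sorted2_keys_eq (ks : List (String × Int)) :
    PySem.List.sorted2 ks Prod.fst Prod.snd false
      = ks.foldl (fun acc c => PySem.List.insertBy pvKLt c acc) [] := rfl

-- canonical form of port A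
theorem reshuffle_pdb_canon (pdb_file : List String) :
    reshuffle_pdb pdb_file
      = pdb_file.filter (fun s => !pvLineIsAtom s)
          ++ PySem.List.sorted2 (pdb_file.filter pvLineIsAtom) pvKey1 pvKey2 false := by
  show (pdb_file.foldl
      (fun (st : List String × List String) line =>
        if pvLineIsAtom line then (st.1 ++ [line], st.2) else (st.1, st.2 ++ [line]))
      ([], [])).2
    ++ PySem.List.sorted2 (pdb_file.foldl
      (fun (st : List String × List String) line =>
        if pvLineIsAtom line then (st.1 ++ [line], st.2) else (st.1, st.2 ++ [line]))
      ([], [])).1 pvKey1 pvKey2 false = _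
  rw [PySem.List.foldl_congr_mem pdb_file
      (fun (st : List String × List String) line =>
        if pvLineIsAtom line then (st.1 ++ [line], st.2) else (st.1, st.2 ++ [line]))
      (fun (st : List String × List String) line =>
        (if pvLineIsAtom line then st.1 ++ [line] else st.1,
         if pvLineIsAtom line then st.2 else st.2 ++ [line]))
      ([], [])
      (by intro acc x _; cases h : pvLineIsAtom x <;> simp [h])]
  rw [PySem.List.foldl_prod_mk
      (f := fun acc line => if pvLineIsAtom line then acc ++ [line] else acc)
      (g := fun acc line => if pvLineIsAtom line then acc else acc ++ [line])]
  dsimp only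
  rw [PySem.List.foldl_append_if_eq_filter pvLineIsAtom,
    PySem.List.foldl_congr_mem pdb_file
      (fun acc line => if pvLineIsAtom line then acc else acc ++ [line])
      (fun acc line => if !pvLineIsAtom line then acc ++ [line] else acc)
      []
      (by intro acc x _; cases h : pvLineIsAtom x <;> simp [h]),
    PySem.List.foldl_append_if_eq_filter (fun s => !pvLineIsAtom s)]
  simp only [List.nil_append]

-- canonical form of port B
theorem reshuffle_pdb_alt_canon (pdb_file : List String) :
    reshuffle_pdb_alt pdb_file
      = pdb_file.filter (fun s => !pvLineIsAtom s)
          ++ (PySem.List.sorted2 (PySem.Set.ofList ((pdb_file.filter pvLineIsAtom).map pvKey))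
                Prod.fst Prod.snd false).flatMap
              (fun c => (pdb_file.filter pvLineIsAtom).filter (fun x => pvKey x == c)) := by
  have hpart : pdb_file.foldl
      (fun (st : List String × PySem.Dict (String × Int) (List String)) line =>
        if pvLineIsAtom line then (st.1, st.2.modify (pvKey line) [] (· ++ [line]))
        else (st.1 ++ [line], st.2))
      ([], PySem.Dict.empty)
      = (pdb_file.filter (fun s => !pvLineIsAtom s),
         (pdb_file.filter pvLineIsAtom).foldl
           (fun (d : PySem.Dict (String × Int) (List String)) line =>
             d.modify (pvKey line) [] (· ++ [line])) PySem.Dict.empty) := by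
    rw [PySem.List.foldl_congr_mem pdb_file
        (fun (st : List String × PySem.Dict (String × Int) (List String)) line =>
          if pvLineIsAtom line then (st.1, st.2.modify (pvKey line) [] (· ++ [line]))
          else (st.1 ++ [line], st.2))
        (fun (st : List String × PySem.Dict (String × Int) (List String)) line =>
          (if pvLineIsAtom line then st.1 else st.1 ++ [line],
           if pvLineIsAtom line then st.2.modify (pvKey line) [] (· ++ [line]) else st.2))
        ([], PySem.Dict.empty)
        (by intro acc x _; cases h : pvLineIsAtom x <;> simp [h])]
    rw [PySem.List.foldl_prod_mk
        (f := fun acc line => if pvLineIsAtom line then acc else acc ++ [line])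
        (g := fun (d : PySem.Dict (String × Int) (List String)) line =>
          if pvLineIsAtom line then d.modify (pvKey line) [] (· ++ [line]) else d)]
    rw [PySem.List.foldl_congr_mem pdb_file
        (fun acc line => if pvLineIsAtom line then acc else acc ++ [line])
        (fun acc line => if !pvLineIsAtom line then acc ++ [line] else acc)
        []
        (by intro acc x _; cases h : pvLineIsAtom x <;> simp [h]),
      PySem.List.foldl_append_if_eq_filter (fun s => !pvLineIsAtom s),
      PySem.List.foldl_if_eq_foldl_filter pvLineIsAtom
        (fun (d : PySem.Dict (String × Int) (List String)) line =>
          d.modify (pvKey line) [] (· ++ [line]))]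
    simp only [List.nil_append]
  have hkeys : ((pdb_file.filter pvLineIsAtom).foldl
      (fun (d : PySem.Dict (String × Int) (List String)) line =>
        d.modify (pvKey line) [] (· ++ [line])) PySem.Dict.empty).keys
      = PySem.Set.ofList ((pdb_file.filter pvLineIsAtom).map pvKey) := by
    rw [PySem.Dict.keys_foldl_modify_key _ pvKey [] (fun _ line => (· ++ [line]))]
    rw [show (PySem.Dict.empty : PySem.Dict (String × Int) (List String)).keys = [] from rfl,
      PySem.Set.update_nil_left]
  have hgetD : ∀ c, ((pdb_file.filter pvLineIsAtom).foldl
      (fun (d : PySem.Dict (String × Int) (List String)) line =>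
        d.modify (pvKey line) [] (· ++ [line])) PySem.Dict.empty).getD c []
      = (pdb_file.filter pvLineIsAtom).filter (fun x => pvKey x == c) := by
    intro c
    rw [show ((pdb_file.filter pvLineIsAtom).foldl
        (fun (d : PySem.Dict (String × Int) (List String)) line =>
          d.modify (pvKey line) [] (· ++ [line])) PySem.Dict.empty)
        = (((pdb_file.filter pvLineIsAtom).map (fun x => (pvKey x, x))).foldl
            (fun d p => d.modify p.1 [] (· ++ [p.2])) PySem.Dict.empty) by
          rw [List.foldl_map]]
    rw [PySem.Dict.getD_foldl_modify_append]
    rw [List.filter_map (f := fun x => (pvKey x, x)) (p := fun p => p.1 == c)]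
    rw [List.map_map]
    simp only [Function.comp_def, PySem.Dict.getD_empty, List.nil_append]
    rw [List.map_id']
  show (PySem.List.sorted2 (pdb_file.foldl
      (fun (st : List String × PySem.Dict (String × Int) (List String)) line =>
        if pvLineIsAtom line then (st.1, st.2.modify (pvKey line) [] (· ++ [line]))
        else (st.1 ++ [line], st.2))
      ([], PySem.Dict.empty)).2.keys Prod.fst Prod.snd false).foldl
      (fun acc c => acc ++ (pdb_file.foldl
        (fun (st : List String × PySem.Dict (String × Int) (List String)) line =>
          if pvLineIsAtom line then (st.1, st.2.modify (pvKey line) [] (· ++ [line]))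
          else (st.1 ++ [line], st.2))
        ([], PySem.Dict.empty)).2.getD c [])
      (pdb_file.foldl
        (fun (st : List String × PySem.Dict (String × Int) (List String)) line =>
          if pvLineIsAtom line then (st.1, st.2.modify (pvKey line) [] (· ++ [line]))
          else (st.1 ++ [line], st.2))
        ([], PySem.Dict.empty)).1 = _
  rw [hpart]
  dsimp only
  rw [hkeys]
  rw [PySem.List.foldl_congr_mem
      (PySem.List.sorted2 (PySem.Set.ofList ((pdb_file.filter pvLineIsAtom).map pvKey))
        Prod.fst Prod.snd false)
      (fun acc c => acc ++ ((pdb_file.filter pvLineIsAtom).foldl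
        (fun (d : PySem.Dict (String × Int) (List String)) line =>
          d.modify (pvKey line) [] (· ++ [line])) PySem.Dict.empty).getD c [])
      (fun acc c => acc ++ (pdb_file.filter pvLineIsAtom).filter (fun x => pvKey x == c))
      (pdb_file.filter (fun s => !pvLineIsAtom s))
      (by intro acc c _; dsimp only; rw [hgetD c])]
  rw [PySem.List.foldl_append_eq_flatMap]

-- ===== VERDICT (by name: the statement is the Claim_ definition above) =====
theorem reshuffle_pdb_spec : Claim_equal_reshuffle_pdb := by
  intro pdb_file _ _
  unfold Spec_reshuffle_pdb
  rw [reshuffle_pdb_canon, reshuffle_pdb_alt_canon, sorted2_lines_eq, sorted2_keys_eq,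
    stable_sort_eq_buckets pvKey (pdb_file.filter pvLineIsAtom)]
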